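-- pv_equiv track=rewrite | github.com/miliar/Code_Jam_Webscraper | solutions_python/Problem_138/713.py | calcDeceit
-- ===== SOURCE A (Python) =====
-- def calcDeceit(naomi, ken):
-- 	points = 0
-- 	while len(naomi) > 0:
-- 		n = naomi.pop(0)
-- 		if n > ken[0]:
-- 			ken.pop(0)
-- 			points += 1
-- 		else:
-- 			ken.pop()
--
-- 	return points
-- ===== SOURCE B (Python) =====
-- def calcDeceit(naomi, ken):
--     lo = 0
--     points = 0
--     for n in naomi:
--         if n > ken[lo]:
--             lo += 1
--             points += 1
--     return points
-- ===== Notes on version B (the rewrite author's own statement) =====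
-- stated objective: faster
-- what changed: Replaces the destructive deque simulation (pop(0)/pop() on both lists, each O(n)) by a single non-mutating pass over naomi with one front index into ken, since the back pops never influence the element compared.
import Mathlib
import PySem

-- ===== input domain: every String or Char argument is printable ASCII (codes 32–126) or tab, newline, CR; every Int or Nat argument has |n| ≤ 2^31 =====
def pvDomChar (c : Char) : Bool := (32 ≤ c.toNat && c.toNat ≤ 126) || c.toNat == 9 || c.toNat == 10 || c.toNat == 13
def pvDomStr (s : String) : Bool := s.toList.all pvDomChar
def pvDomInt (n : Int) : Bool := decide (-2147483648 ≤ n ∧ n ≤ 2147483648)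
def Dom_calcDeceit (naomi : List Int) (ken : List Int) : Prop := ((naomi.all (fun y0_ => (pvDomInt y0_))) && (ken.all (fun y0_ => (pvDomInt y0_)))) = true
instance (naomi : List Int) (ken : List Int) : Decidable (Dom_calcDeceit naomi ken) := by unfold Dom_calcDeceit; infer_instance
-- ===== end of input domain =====

-- B replaces A's O(n^2) destructive deque simulation by one O(n) non-mutating pass with a
-- front index into ken (A pops naomi/ken in place; equivalence claimed for the RETURN value only).

-- ===== PORT A =====
-- A's while-loop: pops naomi's front each step, pops ken's front or back.
def calcLoopA (naomi : List Int) (ken : List Int) (points : Int) : Int :=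
  match naomi with
  | [] => points
  | n :: rest =>
    match ken with
    | [] => points  -- Python raises IndexError (ken[0] on empty); excluded by Pre_
    | k :: kt =>
      if n > k then calcLoopA rest kt (points + 1)
      else calcLoopA rest ((k :: kt).dropLast) points

def calcDeceit (naomi : List Int) (ken : List Int) : Int :=
  calcLoopA naomi ken 0

-- ===== PORT B =====
-- B's for-loop: fold over naomi with state (lo, points); ken[lo] via pyGet?
-- (none = IndexError, unreachable under Pre_).
def calcStepB (ken : List Int) (st : Int × Int) (n : Int) : Int × Int :=
  match PySem.List.pyGet? ken st.1 with
  | some k => if n > k then (st.1 + 1, st.2 + 1) else st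
  | none => st

def calcDeceit_alt (naomi : List Int) (ken : List Int) : Int :=
  (naomi.foldl (calcStepB ken) ((0 : Int), (0 : Int))).2

-- ===== PRECONDITION & SPEC =====
-- A raises IndexError (ken[0] on empty list) as soon as fewer ken blocks than naomi blocks remain.
def Pre_calcDeceit (naomi : List Int) (ken : List Int) : Prop := naomi.length ≤ ken.length
instance (naomi : List Int) (ken : List Int) : Decidable (Pre_calcDeceit naomi ken) := by unfold Pre_calcDeceit; infer_instance
def pvWitness_calcDeceit : List Int × List Int := ([3, 1], [2, 4])

def Spec_calcDeceit (naomi : List Int) (ken : List Int) (out : Int) : Prop := out = calcDeceit_alt naomi ken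
instance (naomi : List Int) (ken : List Int) (out : Int) : Decidable (Spec_calcDeceit naomi ken out) := by unfold Spec_calcDeceit; infer_instance

-- ===== CLAIM (what is proved, stated in full; the proofs are below) =====
def Claim_equal_calcDeceit : Prop := ∀ (naomi : List Int) (ken : List Int), Dom_calcDeceit naomi ken → Pre_calcDeceit naomi ken → Spec_calcDeceit naomi ken (calcDeceit naomi ken)

-- ===== LEMMAS AND PROOFS =====

-- Invariant: A's current ken list c is a nonempty window of the original ken starting at
-- index lo (a prefix of ken.drop lo), long enough to serve the remaining naomi throws.
lemma calcLoop_eq_fold (naomi : List Int) :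
    ∀ (c ken : List Int) (lo : Nat) (points : Int),
      naomi.length ≤ c.length → c <+: ken.drop lo →
      calcLoopA naomi c points = (naomi.foldl (calcStepB ken) ((lo : Int), points)).2 := by
  induction naomi with
  | nil => intro c ken lo points _ _; simp [calcLoopA]
  | cons n rest ih =>
    intro c ken lo points hlen hpre
    match c with
    | [] => simp at hlen
    | k :: kt =>
      obtain ⟨r, hr⟩ := hpre
      have hget : PySem.List.pyGet? ken (lo : Int) = some k := by
        rw [PySem.List.pyGet?_natCast]
        have : ken.drop lo = k :: (kt ++ r) := by simpa using hr.symm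
        have h0 : (ken.drop lo)[0]? = some k := by rw [this]; rfl
        simpa [List.getElem?_drop] using h0
      simp only [calcLoopA, List.foldl_cons, calcStepB, hget]
      by_cases hnk : n > k
      · simp only [if_pos hnk]
        have hpre' : kt <+: ken.drop (lo + 1) := by
          refine ⟨r, ?_⟩
          have : ken.drop (lo + 1) = (ken.drop lo).tail := by
            rw [List.tail_drop]
          rw [this, ← hr]
          rfl
        have := ih kt ken (lo + 1) (points + 1) (by simp at hlen ⊢; omega) hpre'
        simpa [Int.natCast_add] using this
      · simp only [if_neg hnk]
        have hpre' : (k :: kt).dropLast <+: ken.drop lo :=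
          (List.dropLast_prefix _).trans ⟨r, hr⟩
        exact ih _ ken lo points (by simp at hlen ⊢; omega) hpre'

-- ===== VERDICT (by name: the statement is the Claim_ definition above) =====
theorem calcDeceit_spec : Claim_equal_calcDeceit := by
  intro naomi ken _ hpre
  unfold Spec_calcDeceit calcDeceit calcDeceit_alt
  simpa using calcLoop_eq_fold naomi ken ken 0 0 hpre (by simp)
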